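-- pv_equiv track=rewrite | github.com/shhuan/algorithms | py/topcoder/SRM 659/FilipTheFrog.py | countReachableIslands
-- ===== SOURCE A (Python) =====
-- def countReachableIslands(positions, L):
--
--     if not positions:
--         return 0
--
--     start = positions[0]
--     positions = sorted(positions)
--     si = positions.index(start)
--
--     res = 1
--
--
--     # forward
--     i = si
--     while i < len(positions):
--         last = i
--         for j in range(i+1, len(positions)):
--             if positions[j] - positions[i] > L:
--                 break
--             last = j
--         if last <= i:
--             break
--         i = last
--     res += i - si
--
--     # backward
--     i = si
--     while i >= 0:
--         first = i
--         for j in range(i-1, -1, -1):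
--             if positions[i] - positions[j] > L:
--                 break
--             first = j
--         if first == i:
--             break
--         i = first
--     res += si - i
--
--     return res
-- ===== SOURCE B (Python) =====
-- def countReachableIslands(positions, L):
--     if not positions:
--         return 0
--     start = positions[0]
--     pos = sorted(positions)
--     si = pos.index(start)
--     res = 1
--     i = si
--     while i + 1 < len(pos) and pos[i + 1] - pos[i] <= L:
--         i += 1
--         res += 1
--     i = si
--     while i - 1 >= 0 and pos[i] - pos[i - 1] <= L:
--         i -= 1
--         res += 1
--     return res
-- ===== Notes on version B (the rewrite author's own statement) =====
-- stated objective: simpler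
-- what changed: Replaces A's nested farthest-jump-within-L loops (an inner scan finding the farthest island per jump, repeated by an outer while) with two single linear passes over consecutive gaps, counting steps while the adjacent gap is <= L.
import Mathlib
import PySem

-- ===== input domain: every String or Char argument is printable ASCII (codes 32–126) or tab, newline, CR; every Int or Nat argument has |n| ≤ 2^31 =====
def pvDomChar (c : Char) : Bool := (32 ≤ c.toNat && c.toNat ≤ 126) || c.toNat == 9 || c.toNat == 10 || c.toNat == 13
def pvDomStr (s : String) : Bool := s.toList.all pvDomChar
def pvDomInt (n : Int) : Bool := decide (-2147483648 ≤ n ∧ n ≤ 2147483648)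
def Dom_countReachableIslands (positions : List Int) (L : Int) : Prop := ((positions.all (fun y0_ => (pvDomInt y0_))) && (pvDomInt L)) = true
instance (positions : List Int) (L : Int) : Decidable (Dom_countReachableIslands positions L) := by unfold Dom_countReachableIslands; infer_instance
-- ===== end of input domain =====

-- B replaces A's nested farthest-jump-within-L scans with two single passes over consecutive gaps (simpler, same results).

-- ===== PORT A =====
-- inner 'for j in range(i+1, len(positions)): if positions[j] - positions[i] > L: break; last = j'
-- c = number of remaining j's, s = next j, last = current last
def goF (pos : List Int) (L : Int) (i : Nat) : Nat → Nat → Nat → Nat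
  | 0, _, last => last
  | c + 1, s, last =>
    if pos.getD s 0 - pos.getD i 0 > L then last else goF pos L i c (s + 1) s

-- outer 'while i < len(positions): last = …; if last <= i: break; i = last';
-- fuel = pos.length - i suffices: i strictly increases and stays < pos.length
def fwdLoopGo (pos : List Int) (L : Int) : Nat → Nat → Nat
  | 0, i => i
  | d + 1, i =>
    if i < pos.length then
      if goF pos L i (pos.length - (i + 1)) (i + 1) i ≤ i then i
      else fwdLoopGo pos L d (goF pos L i (pos.length - (i + 1)) (i + 1) i)
    else i

def fwdLoop (pos : List Int) (L : Int) (i : Nat) : Nat := fwdLoopGo pos L (pos.length - i) i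

-- inner 'for j in range(i-1, -1, -1): if positions[i] - positions[j] > L: break; first = j'
-- m = number of remaining j's (next j is m-1), first = current first
def goB (pos : List Int) (L : Int) (i : Nat) : Nat → Nat → Nat
  | 0, first => first
  | m + 1, first =>
    if pos.getD i 0 - pos.getD m 0 > L then first else goB pos L i m m

-- outer 'while i >= 0: first = …; if first == i: break; i = first' (i : Nat stays ≥ 0);
-- fuel = i + 1 suffices: i strictly decreases
def bwdLoopGo (pos : List Int) (L : Int) : Nat → Nat → Nat
  | 0, i => i
  | d + 1, i => if goB pos L i i i = i then i else bwdLoopGo pos L d (goB pos L i i i)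

def bwdLoop (pos : List Int) (L : Int) (i : Nat) : Nat := bwdLoopGo pos L (i + 1) i

def countReachableIslands (positions : List Int) (L : Int) : Int :=
  if positions = [] then 0
  else
    let start := positions.headD 0
    let pos := PySem.List.sorted positions (fun x => x) false
    let si := (PySem.List.index? pos start).getD 0
    let fi := fwdLoop pos L si
    let bi := bwdLoop pos L si
    1 + ((fi : Int) - (si : Int)) + ((si : Int) - (bi : Int))

-- ===== PORT B =====
-- 'while i + 1 < len(pos) and pos[i+1] - pos[i] <= L: i += 1; res += 1' (returns the number of
-- steps taken); fuel = pos.length - i suffices: i strictly increases and stays < pos.length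
def altFwdGo (pos : List Int) (L : Int) : Nat → Nat → Nat
  | 0, _ => 0
  | c + 1, i =>
    if i + 1 < pos.length ∧ pos.getD (i + 1) 0 - pos.getD i 0 ≤ L then
      1 + altFwdGo pos L c (i + 1)
    else 0

def altFwd (pos : List Int) (L : Int) (i : Nat) : Nat := altFwdGo pos L (pos.length - i) i

-- 'while i - 1 >= 0 and pos[i] - pos[i-1] <= L: i -= 1; res += 1' (returns the number of steps)
def altBwd (pos : List Int) (L : Int) : Nat → Nat
  | 0 => 0
  | k + 1 => if pos.getD (k + 1) 0 - pos.getD k 0 ≤ L then 1 + altBwd pos L k else 0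

def countReachableIslands_alt (positions : List Int) (L : Int) : Int :=
  if positions = [] then 0
  else
    let start := positions.headD 0
    let pos := PySem.List.sorted positions (fun x => x) false
    let si := (PySem.List.index? pos start).getD 0
    1 + (altFwd pos L si : Int) + (altBwd pos L si : Int)

-- ===== PRECONDITION & SPEC =====
def Spec_countReachableIslands (positions : List Int) (L : Int) (out : Int) : Prop := out = countReachableIslands_alt positions L
instance (positions : List Int) (L : Int) (out : Int) : Decidable (Spec_countReachableIslands positions L out) := by unfold Spec_countReachableIslands; infer_instance

-- ===== CLAIM (what is proved, stated in full; the proofs are below) =====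
def Claim_equal_countReachableIslands : Prop := ∀ (positions : List Int) (L : Int), Dom_countReachableIslands positions L → Spec_countReachableIslands positions L (countReachableIslands positions L)

-- ===== LEMMAS AND PROOFS =====

-- the forward inner scan returns its accumulator or an index in [s, s+c) with every scanned offset within L
theorem goF_spec (pos : List Int) (L : Int) (i : Nat) :
    ∀ c s acc, goF pos L i c s acc = acc ∨
      (s ≤ goF pos L i c s acc ∧ goF pos L i c s acc < s + c ∧
        ∀ j, s ≤ j → j ≤ goF pos L i c s acc → pos.getD j 0 - pos.getD i 0 ≤ L) := by
  intro c
  induction c with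
  | zero => intro s acc; left; rfl
  | succ c ih =>
    intro s acc
    simp only [goF]
    split
    · left; rfl
    · rename_i hc
      push_neg at hc
      rcases ih (s + 1) s with h | ⟨h1, h2, h3⟩
      · right
        rw [h]
        exact ⟨le_refl s, by omega, fun j hj1 hj2 => by
          have : j = s := by omega
          simpa [this] using hc⟩
      · right
        refine ⟨by omega, by omega, fun j hj1 hj2 => ?_⟩
        rcases Nat.eq_or_lt_of_le hj1 with h | h
        · simpa [← h] using hc
        · exact h3 j (by omega) hj2

theorem goF_advance (pos : List Int) (L : Int) (i : Nat)
    (h1 : i + 1 < pos.length) (h2 : pos.getD (i + 1) 0 - pos.getD i 0 ≤ L) :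
    i < goF pos L i (pos.length - (i + 1)) (i + 1) i := by
  rcases hc : pos.length - (i + 1) with _ | c
  · omega
  · simp only [goF]
    rw [if_neg (by omega)]
    rcases goF_spec pos L i c (i + 1 + 1) (i + 1) with h | ⟨h, _, _⟩ <;> omega

theorem altFwd_stop (pos : List Int) (L : Int) (i : Nat)
    (h : ¬(i + 1 < pos.length ∧ pos.getD (i + 1) 0 - pos.getD i 0 ≤ L)) :
    altFwd pos L i = 0 := by
  unfold altFwd
  rcases hc : pos.length - i with _ | c
  · rfl
  · simp only [altFwdGo]
    rw [if_neg h]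

theorem altFwd_step (pos : List Int) (L : Int) (i : Nat)
    (h1 : i + 1 < pos.length) (h2 : pos.getD (i + 1) 0 - pos.getD i 0 ≤ L) :
    altFwd pos L i = 1 + altFwd pos L (i + 1) := by
  unfold altFwd
  rcases hc : pos.length - i with _ | c
  · exact absurd hc (by omega)
  · simp only [altFwdGo]
    rw [if_pos ⟨h1, h2⟩]
    have : c = pos.length - (i + 1) := by omega
    rw [this]

-- if k consecutive gaps from i onward are all ≤ L, altFwd takes those k steps first
theorem altFwd_run (pos : List Int) (L : Int) :
    ∀ k i, (∀ j, i ≤ j → j < i + k → j + 1 < pos.length ∧ pos.getD (j + 1) 0 - pos.getD j 0 ≤ L) →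
      altFwd pos L i = k + altFwd pos L (i + k) := by
  intro k
  induction k with
  | zero => intro i _; simp
  | succ k ih =>
    intro i h
    have h0 := h i (le_refl i) (by omega)
    rw [altFwd_step pos L i h0.1 h0.2]
    rw [ih (i + 1) (fun j hj1 hj2 => h j (by omega) (by omega))]
    have : i + 1 + k = i + (k + 1) := by omega
    rw [this]; omega

theorem fwdLoopGo_eq (pos : List Int) (L : Int)
    (hmono : ∀ p q : Nat, p ≤ q → q < pos.length → pos.getD p 0 ≤ pos.getD q 0) :
    ∀ d i, pos.length - i ≤ d → i < pos.length → fwdLoopGo pos L d i = i + altFwd pos L i := by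
  intro d
  induction d with
  | zero => intro i h1 h2; omega
  | succ d ih =>
    intro i h1 h2
    simp only [fwdLoopGo]
    rw [if_pos h2]
    by_cases hle : goF pos L i (pos.length - (i + 1)) (i + 1) i ≤ i
    · rw [if_pos hle]
      rw [altFwd_stop pos L i (fun hadv => by
        have := goF_advance pos L i hadv.1 hadv.2; omega)]
      omega
    · rw [if_neg hle]
      set last := goF pos L i (pos.length - (i + 1)) (i + 1) i with hlast
      push_neg at hle
      rcases goF_spec pos L i (pos.length - (i + 1)) (i + 1) i with h | ⟨h1', h2', h3'⟩
      · omega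
      · have hlastlt : last < pos.length := by omega
        have hrun : ∀ j, i ≤ j → j < i + (last - i) →
            j + 1 < pos.length ∧ pos.getD (j + 1) 0 - pos.getD j 0 ≤ L := by
          intro j hj1 hj2
          have hjl : j + 1 ≤ last := by omega
          have hb := h3' (j + 1) (by omega) hjl
          have hm := hmono i j hj1 (by omega)
          exact ⟨by omega, by omega⟩
        have haf := altFwd_run pos L (last - i) i hrun
        have hi : i + (last - i) = last := by omega
        rw [hi] at haf
        rw [ih last (by omega) hlastlt, haf]
        omega

theorem fwdLoop_eq (pos : List Int) (L : Int)
    (hmono : ∀ p q : Nat, p ≤ q → q < pos.length → pos.getD p 0 ≤ pos.getD q 0)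
    (i : Nat) (h : i < pos.length) : fwdLoop pos L i = i + altFwd pos L i :=
  fwdLoopGo_eq pos L hmono (pos.length - i) i (le_refl _) h

theorem goB_le (pos : List Int) (L : Int) (i : Nat) :
    ∀ m first, goB pos L i m first ≤ max first m := by
  intro m
  induction m with
  | zero => intro first; simp [goB]
  | succ m ih =>
    intro first
    simp only [goB]
    split
    · omega
    · have := ih m; omega

-- the backward inner scan returns its accumulator or an index < m with every scanned offset within L
theorem goB_spec (pos : List Int) (L : Int) (i : Nat) :
    ∀ m f, goB pos L i m f = f ∨
      (goB pos L i m f < m ∧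
        ∀ j, goB pos L i m f ≤ j → j < m → pos.getD i 0 - pos.getD j 0 ≤ L) := by
  intro m
  induction m with
  | zero => intro f; left; rfl
  | succ m ih =>
    intro f
    simp only [goB]
    split
    · left; rfl
    · rename_i hc
      push_neg at hc
      rcases ih m with h | ⟨h1, h2⟩
      · right
        rw [h]
        exact ⟨by omega, fun j hj1 hj2 => by
          have : j = m := by omega
          simpa [this] using hc⟩
      · right
        refine ⟨by omega, fun j hj1 hj2 => ?_⟩
        by_cases hjm : j = m
        · simpa [hjm] using hc
        · exact h2 j hj1 (by omega)

theorem goB_advance (pos : List Int) (L : Int) (i : Nat)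
    (h1 : 1 ≤ i) (h2 : pos.getD i 0 - pos.getD (i - 1) 0 ≤ L) :
    goB pos L i i i < i := by
  rcases i with _ | k
  · omega
  · simp only [goB]
    rw [if_neg (by simpa using h2)]
    have := goB_le pos L (k + 1) k k
    omega

-- if the k consecutive gaps below i are all ≤ L, altBwd takes those k steps first
theorem altBwd_run (pos : List Int) (L : Int) :
    ∀ k i, k ≤ i → (∀ j, i - k ≤ j → j < i → pos.getD (j + 1) 0 - pos.getD j 0 ≤ L) →
      altBwd pos L i = k + altBwd pos L (i - k) := by
  intro k
  induction k with
  | zero => intro i _ _; simp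
  | succ k ih =>
    intro i hk h
    rcases i with _ | m
    · omega
    · have hcond : pos.getD (m + 1) 0 - pos.getD m 0 ≤ L := h m (by omega) (by omega)
      simp only [altBwd]
      rw [if_pos hcond]
      rw [ih m (by omega) (fun j hj1 hj2 => h j (by omega) (by omega))]
      have : m - k = m + 1 - (k + 1) := by omega
      rw [this]; omega

theorem altBwd_le (pos : List Int) (L : Int) : ∀ i, altBwd pos L i ≤ i := by
  intro i
  induction i with
  | zero => simp [altBwd]
  | succ k ih =>
    simp only [altBwd]
    split
    · omega
    · omega

theorem bwdLoopGo_eq (pos : List Int) (L : Int)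
    (hmono : ∀ p q : Nat, p ≤ q → q < pos.length → pos.getD p 0 ≤ pos.getD q 0) :
    ∀ d i, i < d → i < pos.length → bwdLoopGo pos L d i = i - altBwd pos L i := by
  intro d
  induction d with
  | zero => intro i h1 h2; omega
  | succ d ih =>
    intro i h1 h2
    simp only [bwdLoopGo]
    by_cases hne : goB pos L i i i = i
    · rw [if_pos hne]
      have hz : altBwd pos L i = 0 := by
        by_cases hadv : 1 ≤ i ∧ pos.getD i 0 - pos.getD (i - 1) 0 ≤ L
        · have := goB_advance pos L i hadv.1 hadv.2; omega
        · push_neg at hadv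
          rcases i with _ | k
          · rfl
          · have : pos.getD (k + 1) 0 - pos.getD k 0 > L := by
              have := hadv (by omega); simpa using this
            simp only [altBwd]
            rw [if_neg (by omega)]
      omega
    · rw [if_neg hne]
      set first := goB pos L i i i with hfirst
      have hle : first ≤ i := by have := goB_le pos L i i i; omega
      have hlt : first < i := by omega
      rcases goB_spec pos L i i i with h | ⟨h1', h2'⟩
      · omega
      · have hrun : ∀ j, i - (i - first) ≤ j → j < i →
            pos.getD (j + 1) 0 - pos.getD j 0 ≤ L := by
          intro j hj1 hj2
          have hb := h2' j (by omega) hj2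
          have hm := hmono (j + 1) i (by omega) h2
          omega
        have hab := altBwd_run pos L (i - first) i (by omega) hrun
        have hi : i - (i - first) = first := by omega
        rw [hi] at hab
        rw [ih first (by omega) (by omega), hab]
        omega

theorem bwdLoop_eq (pos : List Int) (L : Int)
    (hmono : ∀ p q : Nat, p ≤ q → q < pos.length → pos.getD p 0 ≤ pos.getD q 0)
    (i : Nat) (h : i < pos.length) : bwdLoop pos L i = i - altBwd pos L i :=
  bwdLoopGo_eq pos L hmono (i + 1) i (by omega) h

-- ===== VERDICT (by name: the statement is the Claim_ definition above) =====
theorem countReachableIslands_spec : Claim_equal_countReachableIslands := by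
  intro positions L _
  unfold Spec_countReachableIslands countReachableIslands countReachableIslands_alt
  by_cases hnil : positions = []
  · simp [hnil]
  · simp only [hnil, if_false]
    set start := positions.headD 0 with hstart
    set pos := PySem.List.sorted positions (fun x => x) false with hpos
    have hmem : start ∈ pos := by
      rw [PySem.List.mem_sorted]
      rcases positions with _ | ⟨h, t⟩
      · exact absurd rfl hnil
      · simp [hstart]
    have hsome : (PySem.List.index? pos start).isSome := by
      rw [PySem.List.index?_isSome_iff]; exact hmem
    obtain ⟨k, hk⟩ := Option.isSome_iff_exists.mp hsome
    obtain ⟨hklt, _, _⟩ := PySem.List.getElem_of_index?_eq_some hk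
    set si := (PySem.List.index? pos start).getD 0 with hsi
    have hsieq : si = k := by rw [hsi, hk]; rfl
    have hsilt : si < pos.length := by rw [hsieq]; exact hklt
    have hmono : ∀ p q : Nat, p ≤ q → q < pos.length → pos.getD p 0 ≤ pos.getD q 0 := by
      intro p q hpq hq
      rw [List.getD_eq_getElem pos 0 (by omega), List.getD_eq_getElem pos 0 hq]
      exact PySem.List.sorted_id_getElem_mono positions hpq hq
    have hf := fwdLoop_eq pos L hmono si hsilt
    have hb := bwdLoop_eq pos L hmono si hsilt
    have hble := altBwd_le pos L si
    rw [hf, hb]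
    omega
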